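-- pv_equiv track=rewrite | github.com/sethluby/msp-ansible-platform | scripts/yaml_indent_fix.py | fix_mapping_list_indentation
-- ===== SOURCE A (Python) =====
-- from typing import List, Tuple
--
-- MAPPING_LIST_KEYS = {"tags", "that", "when", "loop", "with_items", "with_list", "with_dict", "required_controls", "msg"}
--
-- def fix_mapping_list_indentation(lines: List[str]) -> List[str]:
--     i = 0
--     out: List[str] = []
--     while i < len(lines):
--         line = lines[i]
--         stripped = line.strip()
--
--         # Match `<indent><key>:` where key is in MAPPING_LIST_KEYS
--         if stripped.endswith(":"):
--             key = stripped[:-1].strip()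
--             if key in MAPPING_LIST_KEYS:
--                 out.append(line)
--                 base_indent = len(line) - len(line.lstrip())
--                 i += 1
--                 # For subsequent list items directly under this key,
--                 # ensure they are indented base_indent + 2
--                 while i < len(lines):
--                     nxt = lines[i]
--                     nstrip = nxt.strip()
--                     nindent = len(nxt) - len(nxt.lstrip())
--
--                     # stop when we hit a less-indented or sibling key/section
--                     if (nstrip.endswith(":") and (len(nxt) - len(nxt.lstrip())) <= base_indent) or (
--                         not nstrip or (nindent <= base_indent and not nstrip.startswith("- "))
--                     ):
--                         break
--
--                     if nstrip.startswith("- ") and nindent == base_indent: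
--                         # reindent the list item 2 spaces deeper than the key
--                         out.append(" " * (base_indent + 2) + nstrip + "\n")
--                     else:
--                         out.append(nxt)
--                     i += 1
--                 continue
--
--         out.append(line)
--         i += 1
--     return out
-- ===== SOURCE B (Python) =====
-- from typing import List
--
-- MAPPING_LIST_KEYS = {"tags", "that", "when", "loop", "with_items", "with_list", "with_dict", "required_controls", "msg"}
--
-- def fix_mapping_list_indentation(lines: List[str]) -> List[str]:
--     # Single flat pass with explicit state: base is None outside a key block,
--     # or the key's indent while inside one.
--     out: List[str] = []
--     base = None
--     for line in lines:
--         stripped = line.strip()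
--         indent = len(line) - len(line.lstrip())
--         if base is not None:
--             stop = (stripped.endswith(":") and indent <= base) or (
--                 not stripped or (indent <= base and not stripped.startswith("- "))
--             )
--             if stop:
--                 base = None  # block ends; this very line is re-examined below
--             elif stripped.startswith("- ") and indent == base:
--                 out.append(" " * (base + 2) + stripped + "\n")
--                 continue
--             else:
--                 out.append(line)
--                 continue
--         if stripped.endswith(":") and stripped[:-1].strip() in MAPPING_LIST_KEYS:
--             base = indent
--         out.append(line)
--     return out
-- ===== Notes on version B (the rewrite author's own statement) =====
-- stated objective: simpler
-- what changed: Replaced the nested while loops with the continue-without-advancing re-examination trick by a single flat for-loop state machine with an explicit in-block indent state that falls through to key matching on the same line.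
import Mathlib
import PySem

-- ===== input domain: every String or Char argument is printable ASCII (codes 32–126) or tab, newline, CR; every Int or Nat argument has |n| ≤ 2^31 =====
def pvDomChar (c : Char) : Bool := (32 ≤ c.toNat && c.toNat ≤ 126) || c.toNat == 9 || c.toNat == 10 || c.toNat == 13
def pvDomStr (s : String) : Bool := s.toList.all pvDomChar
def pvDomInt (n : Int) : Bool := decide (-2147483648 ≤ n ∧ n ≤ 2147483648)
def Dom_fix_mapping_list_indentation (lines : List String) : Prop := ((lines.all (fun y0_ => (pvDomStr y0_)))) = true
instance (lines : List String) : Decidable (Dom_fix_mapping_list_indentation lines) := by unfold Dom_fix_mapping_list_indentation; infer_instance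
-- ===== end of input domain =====

-- B rewrites A's nested while loops (with `continue` re-examining the break line) as one
-- flat for-loop state machine with an explicit in-block indent state: same output, simpler control flow.

-- ===== PORT A =====
-- the module constant MAPPING_LIST_KEYS (a set of string literals)
def pvKeys : List String :=
  ["tags", "that", "when", "loop", "with_items", "with_list", "with_dict", "required_controls", "msg"]

-- A's two nested while loops over the shared index i become a mutual pair:
-- fmliOuterA is the outer loop body, fmliInnerA the inner loop; the inner loop's
-- `break` followed by `continue` (i unchanged) is the call fmliOuterA (nxt :: rest).
mutual
def fmliOuterA : List String → List String
  | [] => []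
  | line :: rest =>
    let stripped := PySem.Str.strip line
    if PySem.Str.endswith stripped ":" = true ∧
       PySem.Str.strip (PySem.Str.slice stripped none (some (-1))) ∈ pvKeys then
      let base := PySem.Str.len line - PySem.Str.len (PySem.Str.lstrip line)
      line :: fmliInnerA base rest
    else
      line :: fmliOuterA rest
  termination_by l => (l.length, 0)
def fmliInnerA (base : Int) : List String → List String
  | [] => []
  | nxt :: rest =>
    let nstrip := PySem.Str.strip nxt
    let nindent := PySem.Str.len nxt - PySem.Str.len (PySem.Str.lstrip nxt)
    if (PySem.Str.endswith nstrip ":" = true ∧ nindent ≤ base) ∨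
       (nstrip = "" ∨ (nindent ≤ base ∧ ¬ PySem.Str.startswith nstrip "- " = true)) then
      fmliOuterA (nxt :: rest)
    else if PySem.Str.startswith nstrip "- " = true ∧ nindent = base then
      -- " " * (base_indent + 2) + nstrip + "\n"  (string concat built on the char list; exact)
      String.ofList (List.replicate (base + 2).toNat ' ' ++ nstrip.toList ++ ['\n']) :: fmliInnerA base rest
    else
      nxt :: fmliInnerA base rest
  termination_by l => (l.length, 1)
end

def fix_mapping_list_indentation (lines : List String) : List String := fmliOuterA lines

-- ===== PORT B =====
-- Source B's key-matching tail of the loop body (reached when not in a block, or after a stop)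
def fmliKeyB (line stripped : String) (indent : Int) : Option Int × List String :=
  if PySem.Str.endswith stripped ":" = true ∧
     PySem.Str.strip (PySem.Str.slice stripped none (some (-1))) ∈ pvKeys then
    (some indent, [line])
  else
    (none, [line])

-- one iteration of Source B's for-loop: takes the state `base`, returns (new state, emitted lines)
def fmliStepB (st : Option Int) (line : String) : Option Int × List String :=
  let stripped := PySem.Str.strip line
  let indent := PySem.Str.len line - PySem.Str.len (PySem.Str.lstrip line)
  match st with
  | some base =>
    if (PySem.Str.endswith stripped ":" = true ∧ indent ≤ base) ∨
       (stripped = "" ∨ (indent ≤ base ∧ ¬ PySem.Str.startswith stripped "- " = true)) then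
      fmliKeyB line stripped indent            -- stop: fall through to key matching on this line
    else if PySem.Str.startswith stripped "- " = true ∧ indent = base then
      (some base, [String.ofList (List.replicate (base + 2).toNat ' ' ++ stripped.toList ++ ['\n'])])
    else
      (some base, [line])
  | none => fmliKeyB line stripped indent

def fix_mapping_list_indentation_alt (lines : List String) : List String :=
  (lines.foldl (fun (acc : List String × Option Int) line =>
      let r := fmliStepB acc.2 line
      (acc.1 ++ r.2, r.1)) ([], none)).1

-- ===== PRECONDITION & SPEC =====
def Spec_fix_mapping_list_indentation (lines : List String) (out : List String) : Prop := out = fix_mapping_list_indentation_alt lines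
instance (lines : List String) (out : List String) : Decidable (Spec_fix_mapping_list_indentation lines out) := by unfold Spec_fix_mapping_list_indentation; infer_instance

-- ===== CLAIM (what is proved, stated in full; the proofs are below) =====
def Claim_equal_fix_mapping_list_indentation : Prop := ∀ (lines : List String), Dom_fix_mapping_list_indentation lines → Spec_fix_mapping_list_indentation lines (fix_mapping_list_indentation lines)

-- ===== LEMMAS AND PROOFS =====

-- recursive unrolling of B's fold (proof-side helper)
def fmliRunB (st : Option Int) : List String → List String
  | [] => []
  | l :: rest => (fmliStepB st l).2 ++ fmliRunB (fmliStepB st l).1 rest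

theorem fmli_foldl_eq (lines : List String) : ∀ (acc : List String) (st : Option Int),
    (lines.foldl (fun (acc : List String × Option Int) line =>
        let r := fmliStepB acc.2 line
        (acc.1 ++ r.2, r.1)) (acc, st)).1 = acc ++ fmliRunB st lines := by
  induction lines with
  | nil => intro acc st; simp [fmliRunB]
  | cons l rest ih =>
    intro acc st
    simp only [List.foldl, fmliRunB, ih, List.append_assoc]

theorem fmli_main (lines : List String) :
    fmliOuterA lines = fmliRunB none lines ∧
    ∀ base, fmliInnerA base lines = fmliRunB (some base) lines := by
  induction lines with
  | nil => exact ⟨by rw [fmliOuterA]; rfl, fun b => by rw [fmliInnerA]; rfl⟩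
  | cons line rest ih =>
    have houter : fmliOuterA (line :: rest) = fmliRunB none (line :: rest) := by
      rw [fmliOuterA, fmliRunB]
      simp only [fmliStepB, fmliKeyB]
      split_ifs with h
      · simp [ih.2]
      · simp [ih.1]
    refine ⟨houter, fun base => ?_⟩
    rw [fmliInnerA, fmliRunB]
    by_cases hstop :
        (PySem.Str.endswith (PySem.Str.strip line) ":" = true ∧
          PySem.Str.len line - PySem.Str.len (PySem.Str.lstrip line) ≤ base) ∨
        (PySem.Str.strip line = "" ∨
          (PySem.Str.len line - PySem.Str.len (PySem.Str.lstrip line) ≤ base ∧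
            ¬ PySem.Str.startswith (PySem.Str.strip line) "- " = true))
    · -- stop: A re-examines the line via the outer loop; B's step falls through to key matching
      rw [if_pos hstop, houter, fmliRunB]
      have : fmliStepB (some base) line = fmliStepB none line := by
        simp only [fmliStepB]
        rw [if_pos hstop]
      rw [this]
    · rw [if_neg hstop]
      simp only [fmliStepB]
      rw [if_neg hstop]
      split_ifs with h2
      · simp [ih.2]
      · simp [ih.2]

-- ===== VERDICT (by name: the statement is the Claim_ definition above) =====
theorem fix_mapping_list_indentation_spec : Claim_equal_fix_mapping_list_indentation := by
  intro lines _
  unfold Spec_fix_mapping_list_indentation fix_mapping_list_indentation fix_mapping_list_indentation_alt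
  rw [fmli_foldl_eq lines [] none, (fmli_main lines).1]
  simp
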